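-- pv_equiv track=rewrite | github.com/Eustaceyi/Leetcode | 79. Word Search.py | precheck
-- ===== SOURCE A (Python) =====
-- def precheck(board, word):
--     dic = {}
--     for char in word:
--         if char in dic:
--             dic[char] += 1
--         else:
--             dic[char] = 1
--
--     for line in board:
--         for char in line:
--             if char in dic:
--                 dic[char] -= 1
--     for char in dic:
--         if dic[char] > 0:
--             return False
--     return True
-- ===== SOURCE B (Python) =====
-- def precheck(board, word):
--     need = sorted(word)
--     have = sorted(c for row in board for c in row)
--     i = j = 0
--     while i < len(need) and j < len(have):
--         if need[i] == have[j]: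
--             i += 1
--         j += 1
--     return i == len(need)
-- ===== Notes on version B (the rewrite author's own statement) =====
-- stated objective: alternative
-- what changed: Replaces A's single-pass decrementing frequency dictionary with sort-then-merge: both letter sequences are sorted and a two-pointer greedy subsequence scan decides multiset inclusion, with no frequency table at all.
import Mathlib
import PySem

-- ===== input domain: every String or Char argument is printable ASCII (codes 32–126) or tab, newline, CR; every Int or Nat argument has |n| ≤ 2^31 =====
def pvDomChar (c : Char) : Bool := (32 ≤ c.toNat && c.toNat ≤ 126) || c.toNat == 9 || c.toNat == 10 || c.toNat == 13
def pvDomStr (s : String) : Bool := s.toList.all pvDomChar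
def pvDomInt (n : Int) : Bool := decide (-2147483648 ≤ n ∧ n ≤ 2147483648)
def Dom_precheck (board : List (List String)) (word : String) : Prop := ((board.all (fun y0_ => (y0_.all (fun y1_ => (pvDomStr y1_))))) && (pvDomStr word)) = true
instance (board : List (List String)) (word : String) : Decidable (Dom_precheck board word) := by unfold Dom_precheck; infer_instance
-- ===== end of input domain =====

-- B replaces A's single-pass decrementing frequency dictionary by sort-then-merge: both
-- letter sequences are sorted and a two-pointer greedy subsequence scan decides multiset
-- inclusion (objective: alternative; correct because for sorted lists multiset inclusion
-- coincides with the subsequence relation, which the greedy scan decides).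


-- ===== PORT A =====
-- first loop of A: build the frequency dict of the word's characters (keys are 1-char strings)
def pvBuildA (chars : List Char) : PySem.Dict String Int :=
  chars.foldl (fun dic c =>
    let k := String.mk [c]
    if dic.contains k then dic.insert k (dic.getD k 0 + 1) else dic.insert k 1)
    PySem.Dict.empty

-- body of A's second (nested) loop: decrement when the board cell is a key
def pvDecStep (d : PySem.Dict String Int) (ch : String) : PySem.Dict String Int :=
  if d.contains ch then d.insert ch (d.getD ch 0 - 1) else d

-- the dict after A's first two loops
def pvDic2 (board : List (List String)) (word : String) : PySem.Dict String Int :=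
  board.foldl (fun d line => line.foldl pvDecStep d) (pvBuildA word.toList)

-- third loop of A: 'for char in dic: if dic[char] > 0: return False' then 'return True'
def pvCheckA (keys : List String) (d : PySem.Dict String Int) : Bool :=
  match keys with
  | [] => true
  | k :: ks => if d.getD k 0 > 0 then false else pvCheckA ks d

def precheck (board : List (List String)) (word : String) : Bool :=
  pvCheckA (pvDic2 board word).keys (pvDic2 board word)

-- ===== PORT B =====
-- B's while loop: two pointers over the two sorted lists; advancing i on a match and j
-- always is the structural recursion on (need-from-i, have-from-j); 'i == len(need)'
-- at exit is 'remaining need is empty'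
def pvScan (need have_ : List String) : Bool :=
  match need, have_ with
  | [], _ => true
  | _ :: _, [] => false
  | a :: as_, b :: bs => if a == b then pvScan as_ bs else pvScan (a :: as_) bs

def precheck_alt (board : List (List String)) (word : String) : Bool :=
  pvScan (PySem.List.sorted (word.toList.map (fun c => String.mk [c])) (fun x => x) false)
         (PySem.List.sorted (board.flatMap (fun row => row)) (fun x => x) false)

-- ===== PRECONDITION & SPEC =====
def Spec_precheck (board : List (List String)) (word : String) (out : Bool) : Prop := out = precheck_alt board word
instance (board : List (List String)) (word : String) (out : Bool) : Decidable (Spec_precheck board word out) := by unfold Spec_precheck; infer_instance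

-- ===== CLAIM (what is proved, stated in full; the proofs are below) =====
def Claim_equal_precheck : Prop := ∀ (board : List (List String)) (word : String), Dom_precheck board word → Spec_precheck board word (precheck board word)

-- ===== LEMMAS AND PROOFS =====

-- A's build loop is the counter of the word's 1-char-string letters
theorem pvBuildA_eq_counter (chars : List Char) :
    pvBuildA chars = PySem.Dict.counter (chars.map (fun c => String.mk [c])) := by
  rw [← PySem.Dict.foldl_insert_getD_add_one_eq_counter, List.foldl_map]
  unfold pvBuildA
  congr 1
  funext d c
  by_cases h : d.contains (String.mk [c]) = true
  · simp [h]
  · simp only [Bool.not_eq_true] at h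
    simp [h, PySem.Dict.getD_of_not_contains d 0 h]

-- the decrement loop never changes the key list
theorem pvDec_keys (cells : List String) (d : PySem.Dict String Int) :
    (cells.foldl pvDecStep d).keys = d.keys := by
  induction cells generalizing d with
  | nil => rfl
  | cons x xs ih =>
    simp only [List.foldl_cons, ih]
    unfold pvDecStep
    by_cases h : d.contains x = true
    · simp [h, PySem.Dict.keys_insert_of_contains d _ h]
    · simp [h]

-- on an existing key, the decrement loop subtracts the cell count
theorem pvDec_getD (cells : List String) (d : PySem.Dict String Int) (k : String)
    (hk : d.contains k = true) :
    (cells.foldl pvDecStep d).getD k 0 = d.getD k 0 - (cells.count k : Int) := by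
  induction cells generalizing d with
  | nil => simp
  | cons x xs ih =>
    simp only [List.foldl_cons]
    by_cases h : d.contains x = true
    · have hstep : pvDecStep d x = d.insert x (d.getD x 0 - 1) := by
        unfold pvDecStep; simp [h]
      have hk' : (d.insert x (d.getD x 0 - 1)).contains k = true := by
        simp [PySem.Dict.contains_insert, hk]
      rw [hstep, ih _ hk', PySem.Dict.getD_insert]
      by_cases hkx : k = x
      · subst hkx; simp; omega
      · simp [hkx, Ne.symm hkx]
    · have hstep : pvDecStep d x = d := by unfold pvDecStep; simp [h]
      have hkx : x ≠ k := by
        intro hxk; rw [hxk] at h; exact h hk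
      rw [hstep, ih _ hk]
      simp [hkx]

-- A's early-return loop is an 'all' over the keys
theorem pvCheckA_eq_all (keys : List String) (d : PySem.Dict String Int) :
    pvCheckA keys d = keys.all (fun k => decide (d.getD k 0 ≤ 0)) := by
  induction keys with
  | nil => rfl
  | cons k ks ih =>
    unfold pvCheckA
    rw [List.all_cons, ih]
    by_cases h : d.getD k 0 > 0
    · rw [if_pos h, decide_eq_false (by omega), Bool.false_and]
    · rw [if_neg h, decide_eq_true (by omega), Bool.true_and]

-- A = 'every word letter occurs in the cells at least as often as in the word'
theorem precheck_iff (board : List (List String)) (word : String) :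
    precheck board word = true ↔
      ∀ x ∈ word.toList.map (fun c => String.mk [c]),
        List.count x (word.toList.map (fun c => String.mk [c])) ≤
          List.count x (board.flatMap (fun row => row)) := by
  have hdic : pvDic2 board word =
      (board.flatMap (fun row => row)).foldl pvDecStep
        (PySem.Dict.counter (word.toList.map (fun c => String.mk [c]))) := by
    unfold pvDic2
    rw [pvBuildA_eq_counter,
        show (board.flatMap (fun row => row)) = board.flatten by simp,
        List.foldl_flatten]
  unfold precheck
  rw [hdic, pvCheckA_eq_all, pvDec_keys, PySem.Dict.keys_counter]
  simp only [List.all_eq_true, decide_eq_true_eq]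
  constructor
  · intro H x hx
    have hx' : x ∈ PySem.Set.ofList (word.toList.map (fun c => String.mk [c])) :=
      (PySem.Set.mem_ofList _ _).mpr hx
    have hcont : (PySem.Dict.counter (word.toList.map (fun c => String.mk [c]))).contains x = true := by
      rw [PySem.Dict.contains_iff_mem_keys, PySem.Dict.keys_counter]; exact hx'
    have := H x hx'
    rw [pvDec_getD _ _ _ hcont, PySem.Dict.getD_counter] at this
    omega
  · intro H x hx
    have hx' : x ∈ word.toList.map (fun c => String.mk [c]) :=
      (PySem.Set.mem_ofList _ _).mp hx
    have hcont : (PySem.Dict.counter (word.toList.map (fun c => String.mk [c]))).contains x = true := by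
      rw [PySem.Dict.contains_iff_mem_keys, PySem.Dict.keys_counter]; exact hx
    rw [pvDec_getD _ _ _ hcont, PySem.Dict.getD_counter]
    have := H x hx'
    omega

-- the greedy two-pointer scan is exactly the library subsequence check
theorem pvScan_eq_isSublist (have_ need : List String) :
    pvScan need have_ = need.isSublist have_ := by
  induction have_ generalizing need with
  | nil => cases need <;> rfl
  | cons b bs ih =>
    cases need with
    | nil => rfl
    | cons a as_ =>
      unfold pvScan
      rw [List.isSublist]
      by_cases h : (a == b) = true
      · simp only [h, if_true, ih]
      · simp only [h, if_false, Bool.false_eq_true, ih]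

-- B = 'sorted word letters are a subsequence of the sorted cells'
theorem precheck_alt_iff (board : List (List String)) (word : String) :
    precheck_alt board word = true ↔
      (PySem.List.sorted (word.toList.map (fun c => String.mk [c])) (fun x => x) false).Sublist
        (PySem.List.sorted (board.flatMap (fun row => row)) (fun x => x) false) := by
  unfold precheck_alt
  rw [pvScan_eq_isSublist, List.isSublist_iff_sublist]

-- ===== VERDICT (by name: the statement is the Claim_ definition above) =====
theorem precheck_spec : Claim_equal_precheck := by
  intro board word _
  unfold Spec_precheck
  set letters := word.toList.map (fun c => String.mk [c]) with hl
  set cells := board.flatMap (fun row => row) with hc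
  rw [Bool.eq_iff_iff, precheck_iff, precheck_alt_iff]
  have hpl : (PySem.List.sorted letters (fun x => x) false).Perm letters :=
    PySem.List.sorted_perm letters (fun x => x) false
  have hpc : (PySem.List.sorted cells (fun x => x) false).Perm cells :=
    PySem.List.sorted_perm cells (fun x => x) false
  constructor
  · intro H
    have hsub : List.Subperm letters cells := by
      rw [List.subperm_ext_iff]
      intro x hx
      exact H x hx
    have hsub' : List.Subperm (PySem.List.sorted letters (fun x => x) false)
        (PySem.List.sorted cells (fun x => x) false) :=
      (hpc.subperm_left.mpr (hpl.subperm_right.mpr hsub))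
    exact List.sublist_of_subperm_of_pairwise (r := (· ≤ ·)) hsub'
      (PySem.List.sorted_pairwise letters (fun x => x))
      (PySem.List.sorted_pairwise cells (fun x => x))
  · intro H
    have hsub : List.Subperm letters cells :=
      hpl.subperm_right.mp (hpc.subperm_left.mp H.subperm)
    rw [List.subperm_ext_iff] at hsub
    exact hsub
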